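-- pv_equiv track=rewrite | github.com/thatnoobles/advent-of-code-2024 | 09/09_2.py | free_positions_and_sizes
-- ===== SOURCE A (Python) =====
-- FREE_SPACE = -1
--
-- def free_positions_and_sizes(filesystem: list[int]):
--     result = []
--
--     i = 0
--     while i < len(filesystem):
--         if filesystem[i] == FREE_SPACE:
--             size = 1
--             while i + size < len(filesystem) and filesystem[i + size] == FREE_SPACE:
--                 size += 1
--             result.append((i, size))
--             i += size
--         else:
--             i += 1
--     return result
-- ===== SOURCE B (Python) =====
-- FREE_SPACE = -1
--
-- def free_positions_and_sizes(filesystem: list[int]):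
--     result = []
--     start = None
--     for i, x in enumerate(filesystem):
--         if x == FREE_SPACE:
--             if start is None:
--                 start = i
--         else:
--             if start is not None:
--                 result.append((start, i - start))
--                 start = None
--     if start is not None:
--         result.append((start, len(filesystem) - start))
--     return result
-- ===== Notes on version B (the rewrite author's own statement) =====
-- stated objective: simpler
-- what changed: Replaced the nested while-loop with manual index jumping by a single flat enumerate pass that carries an optional run-start and flushes the open run at the end.
import Mathlib
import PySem

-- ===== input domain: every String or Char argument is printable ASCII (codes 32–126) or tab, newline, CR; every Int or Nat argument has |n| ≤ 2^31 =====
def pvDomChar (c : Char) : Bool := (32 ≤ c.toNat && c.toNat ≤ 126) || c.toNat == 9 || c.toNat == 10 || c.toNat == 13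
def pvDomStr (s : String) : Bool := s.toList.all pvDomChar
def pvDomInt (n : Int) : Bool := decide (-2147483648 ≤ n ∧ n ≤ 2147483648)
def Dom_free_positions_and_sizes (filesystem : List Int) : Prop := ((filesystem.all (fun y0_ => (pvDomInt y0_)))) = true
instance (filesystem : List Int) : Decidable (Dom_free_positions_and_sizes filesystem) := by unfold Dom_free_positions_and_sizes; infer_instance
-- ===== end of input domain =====

-- B replaces A's nested while-loops (inner run scan + index jumping) by one flat
-- enumerate pass carrying an optional run start, flushed after the loop (objective: simpler).

-- ===== PORT A =====
-- inner `while i + size < len(filesystem) and filesystem[i + size] == FREE_SPACE: size += 1`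
-- (fuel = fs.length bounds the iterations: each one needs i + size < fs.length, so the 0-fuel arm is never hit)
def countA (fs : List Int) (i : Nat) : Nat → Nat → Nat
  | 0, size => size
  | fuel + 1, size =>
    if i + size < fs.length ∧ fs.getD (i + size) 0 = -1 then countA fs i fuel (size + 1)
    else size

-- outer `while i < len(filesystem): …` (fuel bounds the iterations the same way)
def loopA (fs : List Int) : Nat → Nat → List (Int × Int) → List (Int × Int)
  | 0, _, acc => acc
  | fuel + 1, i, acc =>
    if i < fs.length then
      if fs.getD i 0 = -1 then
        let size := countA fs i fs.length 1
        loopA fs fuel (i + size) (acc ++ [((i : Int), (size : Int))])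
      else loopA fs fuel (i + 1) acc
    else acc

def free_positions_and_sizes (filesystem : List Int) : List (Int × Int) :=
  loopA filesystem filesystem.length 0 []

-- ===== PORT B =====
-- the body of B's `for i, x in enumerate(filesystem)` loop
def altStep (st : Option Int × List (Int × Int)) (p : Int × Int) : Option Int × List (Int × Int) :=
  if p.2 = -1 then
    match st.1 with
    | none => (some p.1, st.2)
    | some s => (some s, st.2)
  else
    match st.1 with
    | none => (none, st.2)
    | some s => (none, st.2 ++ [(s, p.1 - s)])

def free_positions_and_sizes_alt (filesystem : List Int) : List (Int × Int) :=
  let st := (PySem.List.enumerate filesystem 0).foldl altStep (none, [])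
  match st.1 with
  | some s => st.2 ++ [(s, (filesystem.length : Int) - s)]
  | none => st.2

-- ===== PRECONDITION & SPEC =====
def Spec_free_positions_and_sizes (filesystem : List Int) (out : List (Int × Int)) : Prop := out = free_positions_and_sizes_alt filesystem
instance (filesystem : List Int) (out : List (Int × Int)) : Decidable (Spec_free_positions_and_sizes filesystem out) := by unfold Spec_free_positions_and_sizes; infer_instance

-- ===== CLAIM (what is proved, stated in full; the proofs are below) =====
def Claim_equal_free_positions_and_sizes : Prop := ∀ (filesystem : List Int), Dom_free_positions_and_sizes filesystem → Spec_free_positions_and_sizes filesystem (free_positions_and_sizes filesystem)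

-- ===== LEMMAS AND PROOFS =====

theorem getD_eq_get (fs : List Int) (j : Nat) (h : j < fs.length) : fs.getD j 0 = fs[j] := by
  simp [List.getD_eq_getElem?_getD, List.getElem?_eq_getElem h]

-- number of leading FREE_SPACE entries
def lead : List Int → Nat
  | [] => 0
  | x :: xs => if x = -1 then lead xs + 1 else 0

-- canonical reference recursion: B's state machine written structurally over the list
def runsSt : Option Int → List Int → Int → Int → List (Int × Int)
  | none, [], _, _ => []
  | some s, [], _, n => [(s, n - s)]
  | none, x :: xs, i, n => if x = -1 then runsSt (some i) xs (i + 1) n else runsSt none xs (i + 1) n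
  | some s, x :: xs, i, n => if x = -1 then runsSt (some s) xs (i + 1) n else (s, i - s) :: runsSt none xs (i + 1) n

theorem runsSt_nil_none (i n : Int) : runsSt none [] i n = [] := rfl
theorem runsSt_nil_some (s i n : Int) : runsSt (some s) [] i n = [(s, n - s)] := rfl
theorem runsSt_cons_none (x : Int) (xs : List Int) (i n : Int) :
    runsSt none (x :: xs) i n = if x = -1 then runsSt (some i) xs (i + 1) n else runsSt none xs (i + 1) n := rfl
theorem runsSt_cons_some (s x : Int) (xs : List Int) (i n : Int) :
    runsSt (some s) (x :: xs) i n = if x = -1 then runsSt (some s) xs (i + 1) n else (s, i - s) :: runsSt none xs (i + 1) n := rfl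

def finishB (n : Int) (st : Option Int × List (Int × Int)) : List (Int × Int) :=
  match st.1 with
  | some s => st.2 ++ [(s, n - s)]
  | none => st.2

theorem foldl_altStep_eq (l : List Int) : ∀ (i n : Int) (st : Option Int) (acc : List (Int × Int)),
    finishB n ((PySem.List.enumerate l i).foldl altStep (st, acc)) = acc ++ runsSt st l i n := by
  induction l with
  | nil =>
    intro i n st acc
    cases st <;> simp [PySem.List.enumerate_nil, finishB, runsSt_nil_none, runsSt_nil_some]
  | cons x xs ih =>
    intro i n st acc
    rw [PySem.List.enumerate_cons, List.foldl_cons]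
    by_cases hx : x = -1
    · cases st with
      | none =>
        rw [show altStep (none, acc) (i, x) = (some i, acc) from by simp [altStep, hx], ih,
          runsSt_cons_none, if_pos hx]
      | some s =>
        rw [show altStep (some s, acc) (i, x) = (some s, acc) from by simp [altStep, hx], ih,
          runsSt_cons_some, if_pos hx]
    · cases st with
      | none =>
        rw [show altStep (none, acc) (i, x) = (none, acc) from by simp [altStep, hx], ih,
          runsSt_cons_none, if_neg hx]
      | some s =>
        rw [show altStep (some s, acc) (i, x) = (none, acc ++ [(s, i - s)]) from by simp [altStep, hx], ih,
          runsSt_cons_some, if_neg hx]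
        simp

theorem countA_eq_lead (fs : List Int) (i : Nat) : ∀ fuel size, fs.length - (i + size) ≤ fuel →
    countA fs i fuel size = size + lead (fs.drop (i + size)) := by
  intro fuel
  induction fuel with
  | zero =>
    intro size hk
    rw [countA, List.drop_eq_nil_of_le (by omega), show lead [] = 0 from rfl]
    omega
  | succ fuel ih =>
    intro size hk
    rw [countA]
    by_cases h : i + size < fs.length ∧ fs.getD (i + size) 0 = -1
    · rw [if_pos h]
      rw [ih (size + 1) (by omega)]
      have hg : fs[i + size] = -1 := by rw [← getD_eq_get fs (i + size) h.1]; exact h.2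
      rw [List.drop_eq_getElem_cons h.1,
        show lead (fs[i + size] :: fs.drop (i + size + 1)) = lead (fs.drop (i + size + 1)) + 1 from by
          simp [lead, hg]]
      rw [show i + (size + 1) = i + size + 1 from by omega]
      omega
    · rw [if_neg h]
      rcases Nat.lt_or_ge (i + size) fs.length with hlt | hge
      · have hne : fs[i + size] ≠ -1 := fun hc => h ⟨hlt, by rw [getD_eq_get fs _ hlt, hc]⟩
        rw [List.drop_eq_getElem_cons hlt,
          show lead (fs[i + size] :: fs.drop (i + size + 1)) = 0 from by simp [lead, hne]]
        omega
      · rw [List.drop_eq_nil_of_le hge]; simp [lead]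

-- closing an open run: runsSt from `some s` emits the run ending where the FREE prefix ends
theorem runsSt_some (l : List Int) : ∀ (s j n : Int), n = j + l.length →
    runsSt (some s) l j n = (s, (j + (lead l : Int)) - s) :: runsSt none (l.drop (lead l)) (j + (lead l : Int)) n := by
  induction l with
  | nil =>
    intro s j n hn
    simp only [List.length_nil, Nat.cast_zero, add_zero] at hn
    simp [runsSt_nil_some, runsSt_nil_none, lead, hn]
  | cons x xs ih =>
    intro s j n hn
    by_cases hx : x = -1
    · rw [runsSt_cons_some, if_pos hx]
      rw [ih s (j + 1) n (by simp only [List.length_cons] at hn; push_cast at hn ⊢; omega)]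
      rw [show lead (x :: xs) = lead xs + 1 from by simp [lead, hx]]
      rw [show (x :: xs).drop (lead xs + 1) = xs.drop (lead xs) from by simp]
      push_cast
      have e : j + ((lead xs : Int) + 1) = j + 1 + (lead xs : Int) := by ring
      rw [e]
    · rw [show lead (x :: xs) = 0 from by simp [lead, hx]]
      rw [runsSt_cons_some, if_neg hx]
      simp only [Nat.cast_zero, add_zero, List.drop_zero]
      rw [runsSt_cons_none, if_neg hx]

theorem loopA_eq (fs : List Int) : ∀ fuel i acc, fs.length - i ≤ fuel →
    loopA fs fuel i acc = acc ++ runsSt none (fs.drop i) (i : Int) (fs.length : Int) := by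
  intro fuel
  induction fuel with
  | zero =>
    intro i acc hk
    rw [loopA, List.drop_eq_nil_of_le (by omega), runsSt_nil_none]
    simp
  | succ fuel ih =>
    intro i acc hk
    rw [loopA]
    by_cases h : i < fs.length
    · rw [if_pos h]
      have hcons : fs.drop i = fs[i] :: fs.drop (i + 1) := List.drop_eq_getElem_cons h
      by_cases hfree : fs.getD i 0 = -1
      · have hg : fs[i] = -1 := by rw [← getD_eq_get fs i h]; exact hfree
        rw [if_pos hfree]
        show loopA fs fuel (i + countA fs i fs.length 1) (acc ++ [((i : Int), (countA fs i fs.length 1 : Int))]) =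
          acc ++ runsSt none (fs.drop i) (i : Int) (fs.length : Int)
        have hcnt : countA fs i fs.length 1 = 1 + lead (fs.drop (i + 1)) :=
          countA_eq_lead fs i fs.length 1 (by omega)
        have h1 : 1 ≤ countA fs i fs.length 1 := by omega
        rw [ih (i + countA fs i fs.length 1) _ (by omega)]
        rw [hcons, runsSt_cons_none, if_pos hg]
        rw [runsSt_some (fs.drop (i + 1)) (i : Int) ((i : Int) + 1) (fs.length : Int)
          (by rw [List.length_drop]; omega)]
        have hdd : (fs.drop (i + 1)).drop (lead (fs.drop (i + 1))) = fs.drop (i + countA fs i fs.length 1) := by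
          rw [List.drop_drop]; congr 1; omega
        rw [hdd]
        have hidx : (i : Int) + 1 + (lead (fs.drop (i + 1)) : Int) = ((i + countA fs i fs.length 1 : Nat) : Int) := by
          push_cast; omega
        rw [hidx]
        have hv : ((countA fs i fs.length 1 : Nat) : Int) = ((i + countA fs i fs.length 1 : Nat) : Int) - (i : Int) := by
          push_cast; omega
        rw [List.append_assoc, List.singleton_append, hv]
      · have hg : fs[i] ≠ -1 := fun hc => hfree (by rw [getD_eq_get fs i h, hc])
        rw [if_neg hfree]
        rw [ih (i + 1) acc (by omega)]
        rw [hcons, runsSt_cons_none, if_neg hg]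
        norm_cast
    · rw [if_neg h]
      rw [List.drop_eq_nil_of_le (by omega), runsSt_nil_none]
      simp

-- ===== VERDICT (by name: the statement is the Claim_ definition above) =====
theorem free_positions_and_sizes_spec : Claim_equal_free_positions_and_sizes := by
  intro fs _
  unfold Spec_free_positions_and_sizes
  have hb : free_positions_and_sizes_alt fs =
      finishB (fs.length : Int) ((PySem.List.enumerate fs 0).foldl altStep (none, [])) := rfl
  rw [hb, foldl_altStep_eq fs 0 (fs.length : Int) none []]
  rw [show free_positions_and_sizes fs = loopA fs fs.length 0 [] from rfl, loopA_eq fs fs.length 0 [] (by omega)]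
  simp
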